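-- pv_equiv track=rewrite | github.com/GitHolo/python | binary/substr/script.py | subtractBinary
-- ===== SOURCE A (Python) =====
-- def isBinary(n: int):
--     for i in str(n):
--         if i not in ['0', '1']:
--             return False
--     return True
--
-- def subtractBinary(a, b):
--     if isBinary(a) and isBinary(b):
--         result = ''
--         borrow = 0
--
--         if a < b:
--             return "Nie można odjąć, wynik byłby ujemny."
--
--         while a > 0 or b > 0:
--             bit_a = a % 10
--             bit_b = b % 10
--
--             sub = bit_a - bit_b - borrow
--             if sub < 0:
--                 sub += 2
--                 borrow = 1
--             else:
--                 borrow = 0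
--
--             result = str(sub) + result
--
--             a //= 10
--             b //= 10
--
--         result = result.lstrip('0')
--         return result if result else '0'
-- ===== SOURCE B (Python) =====
-- def isBinary(n: int):
--     for i in str(n):
--         if i not in ['0', '1']:
--             return False
--     return True
--
-- def subtractBinary(a, b):
--     if isBinary(a) and isBinary(b):
--         if a < b:
--             return "Nie można odjąć, wynik byłby ujemny."
--         val_a = 0
--         for ch in str(a):
--             val_a = val_a * 2 + (1 if ch == '1' else 0)
--         val_b = 0
--         for ch in str(b):
--             val_b = val_b * 2 + (1 if ch == '1' else 0)
--         return bin(val_a - val_b)[2:]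
-- ===== Notes on version B (the rewrite author's own statement) =====
-- stated objective: simpler
-- what changed: Replaces the digit-by-digit borrow-propagation loop that builds the result string incrementally with a value-based approach: parse each decimal-digit operand as a binary numeral into an integer, subtract the integers, and format the difference with bin()[2:].
import Mathlib
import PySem

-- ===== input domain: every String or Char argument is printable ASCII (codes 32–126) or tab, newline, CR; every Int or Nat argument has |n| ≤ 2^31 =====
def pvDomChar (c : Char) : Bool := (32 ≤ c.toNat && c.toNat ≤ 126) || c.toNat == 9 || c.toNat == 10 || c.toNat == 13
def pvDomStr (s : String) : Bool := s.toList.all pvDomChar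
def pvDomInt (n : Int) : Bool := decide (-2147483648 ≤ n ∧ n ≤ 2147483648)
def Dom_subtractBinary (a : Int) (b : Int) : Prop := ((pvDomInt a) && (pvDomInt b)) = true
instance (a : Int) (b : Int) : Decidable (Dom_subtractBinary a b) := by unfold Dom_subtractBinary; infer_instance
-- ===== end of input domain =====

-- B replaces A's digit-by-digit borrow loop (which builds the result string bit by bit)
-- by parsing both operands' digit strings into integer values, subtracting, and formatting
-- the difference with bin()[2:] (objective: simpler).

-- ===== PORT A =====

-- A's isBinary: `for i in str(n): if i not in ['0','1']: return False ; return True`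
def pyIsBinChars : List Char → Bool
  | [] => true
  | c :: cs => if (['0', '1'].contains c) = false then false else pyIsBinChars cs

def isBinaryA (n : Int) : Bool := pyIsBinChars (PySem.Int.toStr n).toList

-- A's `while a > 0 or b > 0:` loop, state (a, b, borrow, result)
def subLoop (a b borrow : Int) (result : String) : String :=
  if 0 < a ∨ 0 < b then
    let bit_a := PySem.Int.mod a 10
    let bit_b := PySem.Int.mod b 10
    let sub0 := bit_a - bit_b - borrow
    let p : Int × Int := if sub0 < 0 then (sub0 + 2, 1) else (sub0, 0)
    subLoop (PySem.Int.floordiv a 10) (PySem.Int.floordiv b 10) p.2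
      (PySem.Int.toStr p.1 ++ result)
  else result
termination_by (a.toNat + b.toNat)
decreasing_by
  rw [PySem.Int.floordiv_eq_ediv_of_pos (by norm_num : (0:Int) < 10),
      PySem.Int.floordiv_eq_ediv_of_pos (by norm_num : (0:Int) < 10)]
  omega

def subtractBinary (a : Int) (b : Int) : Option String :=
  if isBinaryA a && isBinaryA b then
    if a < b then some "Nie można odjąć, wynik byłby ujemny."
    else
      let result := subLoop a b 0 ""
      -- result.lstrip('0'): drop the char '0' from the left (exact for a one-char strip set)
      let result2 := String.ofList (result.toList.dropWhile (fun c => c == '0'))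
      some (if result2 = "" then "0" else result2)
  else none

-- ===== PORT B =====

-- B's `val = 0; for ch in str(n): val = val * 2 + (1 if ch == '1' else 0)`
def parseBinChars (cs : List Char) : Int :=
  cs.foldl (fun v c => v * 2 + (if c == '1' then (1:Int) else 0)) 0

def subtractBinary_alt (a : Int) (b : Int) : Option String :=
  if isBinaryA a && isBinaryA b then
    if a < b then some "Nie można odjąć, wynik byłby ujemny."
    else
      let val_a := parseBinChars (PySem.Int.toStr a).toList
      let val_b := parseBinChars (PySem.Int.toStr b).toList
      some (PySem.Str.slice (PySem.Int.pyBin (val_a - val_b)) (some 2) none)  -- bin(diff)[2:]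
  else none

-- ===== PRECONDITION & SPEC =====
def Spec_subtractBinary (a : Int) (b : Int) (out : Option String) : Prop := out = subtractBinary_alt a b
instance (a : Int) (b : Int) (out : Option String) : Decidable (Spec_subtractBinary a b out) := by unfold Spec_subtractBinary; infer_instance

-- ===== CLAIM (what is proved, stated in full; the proofs are below) =====
def Claim_equal_subtractBinary : Prop := ∀ (a : Int) (b : Int), Dom_subtractBinary a b → Spec_subtractBinary a b (subtractBinary a b)

-- ===== LEMMAS AND PROOFS =====

-- decimal digit characters of n, most significant first (= Nat.toDigits 10 n)
def digs10 (n : Nat) : List Char :=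
  if _ : n < 10 then [Nat.digitChar (n % 10)]
  else digs10 (n / 10) ++ [Nat.digitChar (n % 10)]
termination_by n
decreasing_by omega

def digs2 (n : Nat) : List Char :=
  if _ : n < 2 then [Nat.digitChar (n % 2)]
  else digs2 (n / 2) ++ [Nat.digitChar (n % 2)]
termination_by n
decreasing_by omega

-- value of n's decimal digits read as binary digits
def bv (n : Nat) : Nat :=
  if _ : n = 0 then 0 else 2 * bv (n / 10) + n % 10
termination_by n
decreasing_by omega

-- value of a list of '0'/'1' characters
def binVal (cs : List Char) : Nat :=
  cs.foldl (fun v c => 2 * v + (if c = '1' then 1 else 0)) 0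

def BinN (n : Nat) : Prop := pyIsBinChars (digs10 n) = true

lemma bv0 : bv 0 = 0 := by rw [bv]; simp

lemma bv_eq (n : Nat) : bv n = 2 * bv (n / 10) + n % 10 := by
  by_cases h : n = 0
  · subst h; simp [bv0]
  · conv_lhs => rw [bv]
    simp [h]

lemma bv1 : bv 1 = 1 := by rw [bv_eq]; simp [bv0]

lemma core10 : ∀ f n acc, n < f → Nat.toDigitsCore 10 f n acc = digs10 n ++ acc := by
  intro f
  induction f with
  | zero => intro n acc h; omega
  | succ f ih =>
    intro n acc h
    rw [Nat.toDigitsCore]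
    by_cases h10 : n < 10
    · have : n / 10 = 0 := by omega
      simp [this, digs10, h10]
    · have hne : ¬ n / 10 = 0 := by omega
      simp only [hne, if_false]
      rw [ih (n / 10) _ (by omega)]
      conv_rhs => rw [digs10]
      simp [h10]

lemma core2 : ∀ f n acc, n < f → Nat.toDigitsCore 2 f n acc = digs2 n ++ acc := by
  intro f
  induction f with
  | zero => intro n acc h; omega
  | succ f ih =>
    intro n acc h
    rw [Nat.toDigitsCore]
    by_cases h2 : n < 2
    · have : n / 2 = 0 := by omega
      simp [this, digs2, h2]
    · have hne : ¬ n / 2 = 0 := by omega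
      simp only [hne, if_false]
      rw [ih (n / 2) _ (by omega)]
      conv_rhs => rw [digs2]
      simp [h2]

lemma toChars_nonneg (a : Int) (h : 0 ≤ a) : PySem.Int.toChars a = digs10 a.toNat := by
  unfold PySem.Int.toChars
  rw [if_neg (by omega)]
  unfold Nat.toDigits
  rw [core10 _ _ _ (by omega)]
  simp

lemma pyIsBinChars_cons (c : Char) (cs : List Char) :
    pyIsBinChars (c :: cs) = ((['0', '1'].contains c) && pyIsBinChars cs) := by
  simp only [pyIsBinChars]
  split <;> rename_i h <;> simp_all <;> tauto

lemma pyIsBinChars_append (xs ys : List Char) :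
    pyIsBinChars (xs ++ ys) = (pyIsBinChars xs && pyIsBinChars ys) := by
  induction xs with
  | nil => simp [pyIsBinChars]
  | cons c cs ih => simp [pyIsBinChars_cons, ih, Bool.and_assoc]

lemma isBinaryA_nonneg (a : Int) (h : isBinaryA a = true) : 0 ≤ a := by
  by_contra hneg
  rw [isBinaryA, PySem.Int.toList_toStr] at h
  unfold PySem.Int.toChars at h
  rw [if_pos (by omega)] at h
  simp [pyIsBinChars] at h

lemma isBinaryA_BinN (a : Int) (h : isBinaryA a = true) : BinN a.toNat := by
  have h0 := isBinaryA_nonneg a h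
  rw [isBinaryA, PySem.Int.toList_toStr, toChars_nonneg a h0] at h
  exact h

lemma pyIsBinChars_singleton (c : Char) :
    pyIsBinChars [c] = true ↔ (c = '0' ∨ c = '1') := by
  simp only [pyIsBinChars]
  split <;> rename_i h <;> simp_all <;> tauto

lemma digitChar_binary {d : Nat} (hd : d < 10)
    (h : Nat.digitChar d = '0' ∨ Nat.digitChar d = '1') : d ≤ 1 := by
  interval_cases d <;> simp_all [Nat.digitChar]

lemma BinN_digit {n : Nat} (h : BinN n) : n % 10 ≤ 1 := by
  unfold BinN at h
  rw [digs10] at h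
  refine digitChar_binary (by omega) ?_
  by_cases h10 : n < 10
  · rw [dif_pos h10] at h
    exact (pyIsBinChars_singleton _).1 h
  · rw [dif_neg h10, pyIsBinChars_append] at h
    exact (pyIsBinChars_singleton _).1 (by simp_all)

lemma BinN_div {n : Nat} (h : BinN n) : BinN (n / 10) := by
  unfold BinN at *
  rw [digs10] at h
  by_cases h10 : n < 10
  · have h0 : n / 10 = 0 := by omega
    rw [h0, digs10]
    decide
  · rw [dif_neg h10, pyIsBinChars_append] at h
    simp_all

lemma digitChar_bit {d : Nat} (h : d ≤ 1) :
    (if Nat.digitChar d = '1' then 1 else 0) = d := by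
  interval_cases d <;> simp [Nat.digitChar]

lemma binVal_acc (cs : List Char) (a : Nat) :
    cs.foldl (fun v c => 2 * v + (if c = '1' then 1 else 0)) a
      = a * 2 ^ cs.length + binVal cs := by
  induction cs generalizing a with
  | nil => simp [binVal]
  | cons c cs ih =>
    have h2 := ih (2 * 0 + (if c = '1' then 1 else 0))
    have hb : binVal (c :: cs)
        = (2 * 0 + (if c = '1' then 1 else 0)) * 2 ^ cs.length + binVal cs := by
      simp only [binVal, List.foldl_cons] at h2 ⊢
      exact h2
    rw [List.foldl_cons, ih, hb, List.length_cons]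
    ring

lemma binVal_append_singleton (s : List Char) (c : Char) :
    binVal (s ++ [c]) = 2 * binVal s + (if c = '1' then 1 else 0) := by
  simp [binVal, List.foldl_append]

lemma parse_eq (cs : List Char) : parseBinChars cs = (binVal cs : Int) := by
  suffices h : ∀ (a : Nat), cs.foldl (fun v c => v * 2 + (if c == '1' then (1:Int) else 0)) (a : Int)
      = ((cs.foldl (fun v c => 2 * v + (if c = '1' then 1 else 0)) a : Nat) : Int) by
    simpa [parseBinChars, binVal] using h 0
  induction cs with
  | nil => simp
  | cons c cs ih =>
    intro a
    simp only [List.foldl_cons]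
    have h1 : ((a:Int) * 2 + (if (c == '1') = true then (1:Int) else 0))
        = ((2 * a + (if c = '1' then 1 else 0) : Nat) : Int) := by
      by_cases hc : c = '1' <;> simp [hc] <;> push_cast <;> ring
    rw [h1, ih]

lemma bv_parse : ∀ n, BinN n → binVal (digs10 n) = bv n := by
  intro n
  induction n using Nat.strong_induction_on with
  | _ n ih =>
    intro h
    have hd := BinN_digit h
    rw [digs10]
    by_cases h10 : n < 10
    · rw [dif_pos h10]
      have hn : n % 10 = n := Nat.mod_eq_of_lt h10
      rw [hn] at hd
      simp only [binVal, List.foldl_cons, List.foldl_nil, Nat.mul_zero, Nat.zero_add]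
      rw [hn, digitChar_bit hd]
      interval_cases n <;> simp [bv0, bv1]
    · rw [dif_neg h10, binVal_append_singleton, digitChar_bit hd,
        ih (n / 10) (by omega) (BinN_div h)]
      exact (bv_eq n).symm

lemma bv_mono_strict : ∀ m k, k < m → BinN k → BinN m → bv k < bv m := by
  intro m
  induction m using Nat.strong_induction_on with
  | _ m ih =>
    intro k hkm hk hm
    by_cases h10 : m < 10
    · have hm1 := BinN_digit hm
      have hk1 := BinN_digit hk
      rw [Nat.mod_eq_of_lt h10] at hm1
      rw [Nat.mod_eq_of_lt (by omega)] at hk1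
      have hk0 : k = 0 := by omega
      have hm0 : m = 1 := by omega
      subst hk0; subst hm0; simp [bv0, bv1]
    · have hdm := BinN_digit hm
      have hdk := BinN_digit hk
      have hqle : k / 10 ≤ m / 10 := Nat.div_le_div_right (by omega)
      rw [bv_eq m, bv_eq k]
      rcases Nat.lt_or_ge (k / 10) (m / 10) with hq | hq
      · have := ih (m / 10) (by omega) (k / 10) hq (BinN_div hk) (BinN_div hm)
        omega
      · have hqeq : k / 10 = m / 10 := by omega
        have : k % 10 < m % 10 := by omega
        rw [hqeq]
        omega

lemma str_ext {s t : String} (h : s.toList = t.toList) : s = t := by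
  have := congrArg String.ofList h
  simpa using this

lemma toStr_digit_append (d : Nat) (hd : d < 10) (r : List Char) :
    PySem.Int.toStr (↑d) ++ String.ofList r = String.ofList (Nat.digitChar d :: r) := by
  apply str_ext
  rw [String.toList_append, PySem.Int.toList_toStr, toChars_nonneg _ (by omega)]
  simp only [Int.toNat_natCast, String.toList_ofList]
  rw [digs10, dif_pos hd, Nat.mod_eq_of_lt hd]
  simp

lemma loop_spec : ∀ N m k borrow (r : List Char), m + k ≤ N → BinN m → BinN k →
    borrow ≤ 1 → borrow + bv k ≤ bv m →
    ∃ s : List Char,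
      (subLoop (↑m) (↑k) (↑borrow) (String.ofList r)).toList = s ++ r ∧
      (∀ c ∈ s, c = '0' ∨ c = '1') ∧ binVal s + bv k + borrow = bv m := by
  intro N
  induction N with
  | zero =>
    intro m k borrow r hN hm hk hb hle
    have hm0 : m = 0 := by omega
    have hk0 : k = 0 := by omega
    subst hm0; subst hk0
    rw [subLoop, if_neg (by simp)]
    refine ⟨[], by simp, by simp, ?_⟩
    simp only [bv0] at hle ⊢
    simp [binVal]
    omega
  | succ N ihN =>
    intro m k borrow r hN hm hk hb hle
    by_cases hz : m = 0 ∧ k = 0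
    · obtain ⟨hm0, hk0⟩ := hz
      subst hm0; subst hk0
      rw [subLoop, if_neg (by simp)]
      refine ⟨[], by simp, by simp, ?_⟩
      simp only [bv0] at hle ⊢
      simp [binVal]
      omega
    · have hpos : 0 < m ∨ 0 < k := by
        rcases Nat.eq_zero_or_pos m with h | h <;> rcases Nat.eq_zero_or_pos k with h' | h' <;>
          simp_all
      have hdm : m % 10 ≤ 1 := BinN_digit hm
      have hdk : k % 10 ≤ 1 := BinN_digit hk
      have hmod1 : PySem.Int.mod (↑m) 10 = ((m % 10 : Nat) : Int) := by
        rw [PySem.Int.mod_eq_emod_of_pos (by norm_num)]; omega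
      have hmod2 : PySem.Int.mod (↑k) 10 = ((k % 10 : Nat) : Int) := by
        rw [PySem.Int.mod_eq_emod_of_pos (by norm_num)]; omega
      have hdiv1 : PySem.Int.floordiv (↑m) 10 = ((m / 10 : Nat) : Int) := by
        rw [PySem.Int.floordiv_eq_ediv_of_pos (by norm_num)]; omega
      have hdiv2 : PySem.Int.floordiv (↑k) 10 = ((k / 10 : Nat) : Int) := by
        rw [PySem.Int.floordiv_eq_ediv_of_pos (by norm_num)]; omega
      have hsum : m / 10 + k / 10 ≤ N := by omega
      have hbvm := bv_eq m
      have hbvk := bv_eq k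
      have hcond : (0 : Int) < ↑m ∨ (0 : Int) < ↑k := by
        rcases hpos with h | h
        · exact Or.inl (by exact_mod_cast h)
        · exact Or.inr (by exact_mod_cast h)
      rw [subLoop, if_pos hcond]
      simp only [hmod1, hmod2, hdiv1, hdiv2]
      by_cases hneg : ((m % 10 : Nat) : Int) - ↑(k % 10) - ↑borrow < 0
      · rw [if_pos hneg]
        have hnegN : m % 10 < k % 10 + borrow := by omega
        set subn : Nat := m % 10 + 2 - k % 10 - borrow with hsubn
        have hcast : ((m % 10 : Nat) : Int) - ↑(k % 10) - ↑borrow + 2 = ((subn : Nat) : Int) := by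
          omega
        have hsub1 : subn ≤ 1 := by omega
        rw [hcast, toStr_digit_append subn (by omega)]
        have hineq : 1 + bv (k / 10) ≤ bv (m / 10) := by omega
        obtain ⟨s, hs1, hs2, hs3⟩ :=
          ihN (m / 10) (k / 10) 1 (Nat.digitChar subn :: r) hsum (BinN_div hm) (BinN_div hk)
            le_rfl hineq
        refine ⟨s ++ [Nat.digitChar subn], ?_, ?_, ?_⟩
        · rw [List.append_assoc]
          exact hs1
        · intro c hc
          rcases List.mem_append.1 hc with h | h
          · exact hs2 c h
          · have hc' : c = Nat.digitChar subn := by simpa using h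
            subst hc'
            interval_cases subn
            · left; decide
            · right; decide
        · rw [binVal_append_singleton, digitChar_bit hsub1]
          omega
      · rw [if_neg hneg]
        set subn : Nat := m % 10 - k % 10 - borrow with hsubn
        have hcast : ((m % 10 : Nat) : Int) - ↑(k % 10) - ↑borrow = ((subn : Nat) : Int) := by
          omega
        have hsub1 : subn ≤ 1 := by omega
        rw [hcast, toStr_digit_append subn (by omega)]
        have hineq : 0 + bv (k / 10) ≤ bv (m / 10) := by omega
        obtain ⟨s, hs1, hs2, hs3⟩ :=
          ihN (m / 10) (k / 10) 0 (Nat.digitChar subn :: r) hsum (BinN_div hm) (BinN_div hk)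
            (by omega) hineq
        refine ⟨s ++ [Nat.digitChar subn], ?_, ?_, ?_⟩
        · rw [List.append_assoc]
          exact hs1
        · intro c hc
          rcases List.mem_append.1 hc with h | h
          · exact hs2 c h
          · have hc' : c = Nat.digitChar subn := by simpa using h
            subst hc'
            interval_cases subn
            · left; decide
            · right; decide
        · rw [binVal_append_singleton, digitChar_bit hsub1]
          omega

lemma head_one_pos {t : List Char} (h : t.head? = some '1') : 1 ≤ binVal t := by
  cases t with
  | nil => simp at h
  | cons c rest =>
    have hc : c = '1' := by simpa using h
    subst hc
    have hacc := binVal_acc rest 1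
    have hpow : 1 ≤ 2 ^ rest.length := Nat.one_le_two_pow
    simp only [binVal, List.foldl_cons]
    norm_num
    simp only [binVal] at hacc
    omega

lemma canon : ∀ t : List Char, (∀ c ∈ t, c = '0' ∨ c = '1') → t.head? = some '1' →
    digs2 (binVal t) = t := by
  intro t
  induction t using List.reverseRecOn with
  | nil => intro _ h; simp at h
  | append_singleton ts c ih =>
    intro hmem hhead
    cases ts with
    | nil =>
      have hc : c = '1' := by simpa using hhead
      subst hc
      have h1 : binVal ([] ++ ['1']) = 1 := by norm_num [binVal]
      rw [h1, digs2]
      norm_num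
      decide
    | cons t0 ts' =>
      have hh : t0 = '1' := by simpa using hhead
      have hhead' : (t0 :: ts').head? = some '1' := by simp [hh]
      have hv : 1 ≤ binVal (t0 :: ts') := head_one_pos hhead'
      have hc : c = '0' ∨ c = '1' := hmem c (by simp)
      obtain ⟨bit, hbite, hb1, hcb⟩ :
          ∃ b : Nat, (if c = '1' then 1 else 0) = b ∧ b ≤ 1 ∧ Nat.digitChar b = c := by
        rcases hc with h | h <;> subst h <;> exact ⟨_, rfl, by decide, by decide⟩
      rw [binVal_append_singleton, hbite]
      conv_lhs => rw [digs2]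
      rw [dif_neg (by omega)]
      have hdiv : (2 * binVal (t0 :: ts') + bit) / 2 = binVal (t0 :: ts') := by omega
      have hmod : (2 * binVal (t0 :: ts') + bit) % 2 = bit := by omega
      rw [hdiv, hmod,
        ih (fun x hx => hmem x (by
          simp only [List.cons_append, List.mem_cons, List.mem_append] at hx ⊢
          tauto)) hhead', hcb]

lemma binVal_dropWhile (s : List Char) :
    binVal (s.dropWhile (fun c => c == '0')) = binVal s := by
  induction s with
  | nil => rfl
  | cons c cs ih =>
    by_cases hc : c = '0'
    · subst hc
      simp only [List.dropWhile_cons]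
      norm_num
      rw [ih]
      simp [binVal]
    · simp [List.dropWhile_cons, hc]

lemma slice_pyBin (d : Nat) :
    (PySem.Str.slice (PySem.Int.pyBin ((d : Nat) : Int)) (some 2) none).toList = digs2 d := by
  rw [PySem.Str.toList_slice, PySem.Int.toList_pyBin]
  unfold PySem.Int.toBinChars0b
  rw [if_neg (by omega)]
  show PySem.List.slice _ (some 2) none = _
  rw [PySem.List.slice_from _ (a := 2) (by norm_num)]
  show List.drop 2 ('0' :: 'b' :: Nat.toDigits 2 (((d : Nat) : Int)).toNat) = _
  simp only [Int.toNat_natCast, List.drop_succ_cons, List.drop_zero]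
  unfold Nat.toDigits
  rw [core2 _ _ _ (by omega)]
  simp

lemma dropWhile_result (s : List Char) (hs2 : ∀ c ∈ s, c = '0' ∨ c = '1')
    {c : Char} {rest : List Char}
    (h : s.dropWhile (fun c => c == '0') = c :: rest) : c = '1' := by
  have hfalse : (c == '0') = false := by
    have := List.head?_dropWhile_not (fun c => c == '0') s
    rw [h] at this
    simpa using this
  have hmem : c ∈ s := (List.dropWhile_sublist _).mem (by rw [h]; simp)
  rcases hs2 c hmem with h0 | h1
  · simp [h0] at hfalse
  · exact h1

-- ===== VERDICT (by name: the statement is the Claim_ definition above) =====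
set_option maxHeartbeats 1000000 in
theorem subtractBinary_spec : Claim_equal_subtractBinary := by
  unfold Claim_equal_subtractBinary Spec_subtractBinary
  intro a b _
  unfold subtractBinary subtractBinary_alt
  by_cases hbin : (isBinaryA a && isBinaryA b) = true
  · rw [if_pos hbin, if_pos hbin]
    obtain ⟨ha, hb⟩ := Bool.and_eq_true_iff.1 hbin
    by_cases hlt : a < b
    · rw [if_pos hlt, if_pos hlt]
    · rw [if_neg hlt, if_neg hlt]
      simp only []
      have ha0 := isBinaryA_nonneg a ha
      have hb0 := isBinaryA_nonneg b hb
      have hBm := isBinaryA_BinN a ha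
      have hBk := isBinaryA_BinN b hb
      have ham : a = ((a.toNat : Nat) : Int) := by omega
      have hbk : b = ((b.toNat : Nat) : Int) := by omega
      rw [ham, hbk]
      set m := a.toNat with hm
      set k := b.toNat with hk
      have hkm : k ≤ m := by omega
      have hbvle : bv k ≤ bv m := by
        rcases Nat.lt_or_ge k m with h | h
        · exact Nat.le_of_lt (bv_mono_strict m k h hBk hBm)
        · have : k = m := by omega
          rw [this]
      obtain ⟨s, hs1, hs2, hs3⟩ :=
        loop_spec (m + k) m k 0 [] le_rfl hBm hBk (by omega) (by omega)
      have hempty : String.ofList ([] : List Char) = "" := by decide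
      rw [hempty] at hs1
      push_cast at hs1
      rw [List.append_nil] at hs1
      rw [hs1]
      have hparse : ∀ (n : Nat), BinN n →
          parseBinChars (PySem.Int.toStr ((n : Nat) : Int)).toList = ((bv n : Nat) : Int) := by
        intro n hn
        rw [PySem.Int.toList_toStr, toChars_nonneg _ (by omega), parse_eq]
        simp only [Int.toNat_natCast]
        rw [bv_parse n hn]
      rw [hparse m hBm, hparse k hBk]
      set d : Nat := bv m - bv k with hd
      have hdiff : ((bv m : Nat) : Int) - ((bv k : Nat) : Int) = ((d : Nat) : Int) := by omega
      rw [hdiff]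
      refine congrArg some ?_
      apply str_ext
      rw [slice_pyBin d]
      have hvt : binVal (s.dropWhile (fun c => c == '0')) = d := by
        rw [binVal_dropWhile]
        omega
      rcases hdrop : s.dropWhile (fun c => c == '0') with _ | ⟨c, rest⟩
      · -- all zeros: d = 0
        rw [hdrop] at hvt
        have hd0 : d = 0 := by simpa [binVal] using hvt.symm
        rw [hempty, if_pos rfl, hd0, digs2]
        decide
      · have hc1 : c = '1' := dropWhile_result s hs2 hdrop
        rw [hdrop] at hvt
        have hne : String.ofList (c :: rest) ≠ "" := by
          intro h
          have := congrArg String.toList h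
          simp at this
        rw [if_neg hne, String.toList_ofList, ← hvt]
        refine (canon (c :: rest) ?_ (by simp [hc1])).symm
        intro x hx
        exact hs2 x ((List.dropWhile_sublist _).mem (by rw [hdrop]; exact hx))
  · rw [if_neg hbin, if_neg hbin]
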